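-- pv_equiv track=rewrite | github.com/ykodama/codingbat_python | lone_sum.py | lone_sum
-- ===== SOURCE A (Python) =====
-- def lone_sum(a, b, c):
-- 	n_sum = 0
-- 	nums = [a, b, c]
-- 	for i,n1 in enumerate(nums):
-- 		isSame = False
-- 		for j,n2 in enumerate(nums):
-- 			if i != j and n1 == n2:
-- 				isSame = True
-- 		if not isSame:
-- 			n_sum += n1
--
-- 	return n_sum
-- ===== SOURCE B (Python) =====
-- def lone_sum(a, b, c):
--     counts = {}
--     for n in (a, b, c):
--         counts[n] = counts.get(n, 0) + 1
--     return sum(v for v, cnt in counts.items() if cnt == 1)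
-- ===== Notes on version B (the rewrite author's own statement) =====
-- stated objective: idiomatic
-- what changed: Replaces the nested O(n^2) duplicate-detection scan with a frequency dict built in one pass, then sums the distinct keys whose count is 1.
import Mathlib
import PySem

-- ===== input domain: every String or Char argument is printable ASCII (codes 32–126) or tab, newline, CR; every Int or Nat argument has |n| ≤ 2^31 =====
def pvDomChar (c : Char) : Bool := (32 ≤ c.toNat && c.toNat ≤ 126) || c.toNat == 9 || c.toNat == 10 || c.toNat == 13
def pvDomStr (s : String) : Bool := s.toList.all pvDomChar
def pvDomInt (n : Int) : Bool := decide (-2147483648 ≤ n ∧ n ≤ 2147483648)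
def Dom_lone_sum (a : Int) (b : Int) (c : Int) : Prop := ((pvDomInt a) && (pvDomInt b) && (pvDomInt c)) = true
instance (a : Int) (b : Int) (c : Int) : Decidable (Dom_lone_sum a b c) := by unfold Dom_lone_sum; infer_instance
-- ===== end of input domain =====

-- B replaces A's nested duplicate-detection scan with a frequency dict plus one pass over its distinct entries (idiomatic; same cost at n=3).


-- ===== PORT A =====
def lone_sum (a : Int) (b : Int) (c : Int) : Int :=
  let nums : List Int := [a, b, c]
  (PySem.List.enumerate nums).foldl
    (fun n_sum (p : Int × Int) =>
      let isSame :=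
        (PySem.List.enumerate nums).foldl
          (fun s (q : Int × Int) => if p.1 ≠ q.1 ∧ p.2 = q.2 then true else s) false
      if !isSame then n_sum + p.2 else n_sum)
    0

-- ===== PORT B =====
def lone_sum_alt (a : Int) (b : Int) (c : Int) : Int :=
  let counts : PySem.Dict Int Int :=
    [a, b, c].foldl (fun d n => d.insert n (d.getD n 0 + 1)) PySem.Dict.empty
  counts.items.foldl (fun s (p : Int × Int) => if p.2 = 1 then s + p.1 else s) 0

-- ===== PRECONDITION & SPEC =====
def Spec_lone_sum (a : Int) (b : Int) (c : Int) (out : Int) : Prop := out = lone_sum_alt a b c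
instance (a : Int) (b : Int) (c : Int) (out : Int) : Decidable (Spec_lone_sum a b c out) := by unfold Spec_lone_sum; infer_instance

-- ===== CLAIM (what is proved, stated in full; the proofs are below) =====
def Claim_equal_lone_sum : Prop := ∀ (a : Int) (b : Int) (c : Int), Dom_lone_sum a b c → Spec_lone_sum a b c (lone_sum a b c)

-- ===== LEMMAS AND PROOFS =====

-- ===== VERDICT (by name: the statement is the Claim_ definition above) =====
theorem lone_sum_spec : Claim_equal_lone_sum := by
  intro a b c _
  unfold Spec_lone_sum lone_sum lone_sum_alt
  by_cases hab : a = b <;> by_cases hac : a = c <;> by_cases hbc : b = c <;>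
    simp [PySem.List.enumerate, PySem.Dict.insert, PySem.Dict.getD, PySem.Dict.get?,
          PySem.Dict.empty, List.foldl, hab, hac, hbc,
          Ne.symm, beq_iff_eq]
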